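-- pv_equiv track=rewrite | github.com/20032157G/Factorization | fls.py | frv
-- ===== SOURCE A (Python) =====
-- ffr=list('0123456789-+=*sxy ')
--
-- def frv(Fg):
--     r=False
--     if(len(str(Fg))>0):
--         r=True
--         l=list(set(str(Fg)))
--         i=0
--         while(i<len(l)):
--             if not(l[i]in ffr):
--                 r=False
--                 break
--             i+=1
--
--     return r
-- ===== SOURCE B (Python) =====
-- ffr=list('0123456789-+=*sxy ')
--
-- def frv(Fg):
--     s = str(Fg)
--     return len(s) > 0 and sum(s.count(c) for c in ffr) == len(s)
-- ===== Notes on version B (the rewrite author's own statement) =====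
-- stated objective: alternative
-- what changed: B inverts the traversal: instead of deduplicating the string and scanning its characters with membership tests against the allowed list, B loops over the fixed allowed alphabet, counts each allowed character's occurrences in the string, and accepts iff the string is nonempty and the counts sum to len(s).
import Mathlib
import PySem

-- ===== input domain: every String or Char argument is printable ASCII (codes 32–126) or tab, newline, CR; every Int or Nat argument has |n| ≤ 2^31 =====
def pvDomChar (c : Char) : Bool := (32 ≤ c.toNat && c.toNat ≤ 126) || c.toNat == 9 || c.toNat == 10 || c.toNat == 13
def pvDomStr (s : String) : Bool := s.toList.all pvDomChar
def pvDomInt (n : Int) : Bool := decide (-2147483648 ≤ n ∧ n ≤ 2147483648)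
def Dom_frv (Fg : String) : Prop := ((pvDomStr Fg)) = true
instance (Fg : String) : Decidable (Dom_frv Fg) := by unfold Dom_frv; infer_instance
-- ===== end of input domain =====

-- B inverts the traversal: it loops over the fixed allowed alphabet counting each character's
-- occurrences in the string and accepts iff the string is nonempty and the counts sum to its length
-- (instead of A's dedup-then-scan with membership tests); objective: alternative.

-- ===== PORT A =====
def ffr : List Char := "0123456789-+=*sxy ".toList

-- A's while-loop over the dedup list l with the early break
def frvLoop : List Char → Bool
  | [] => true
  | c :: rest => if !(ffr.contains c) then false else frvLoop rest

def frv (Fg : String) : Bool :=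
  if PySem.Str.len Fg > 0 then frvLoop (PySem.Set.ofList Fg.toList) else false

-- ===== PORT B =====
-- Source B: len(s) > 0 and sum(s.count(c) for c in ffr) == len(s)
def frv_alt (Fg : String) : Bool :=
  decide (PySem.Str.len Fg > 0) &&
  decide (ffr.foldl (fun acc c => acc + PySem.Str.count Fg (String.ofList [c])) 0 = PySem.Str.len Fg)

-- ===== PRECONDITION & SPEC =====
def Spec_frv (Fg : String) (out : Bool) : Prop := out = frv_alt Fg
instance (Fg : String) (out : Bool) : Decidable (Spec_frv Fg out) := by unfold Spec_frv; infer_instance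

-- ===== CLAIM (what is proved, stated in full; the proofs are below) =====
def Claim_equal_frv : Prop := ∀ (Fg : String), Dom_frv Fg → Spec_frv Fg (frv Fg)

-- ===== LEMMAS AND PROOFS =====
theorem countGo_single (c : Char) (cs : List Char) (fuel acc : Nat) (h : cs.length ≤ fuel) :
    PySem.Chars.count.go [c] fuel cs acc = acc + cs.count c := by
  induction cs generalizing fuel acc with
  | nil => cases fuel <;> simp [PySem.Chars.count.go]
  | cons x t ih =>
    cases fuel with
    | zero => simp at h
    | succ f =>
      have ht : t.length ≤ f := by simpa using h
      simp only [PySem.Chars.count.go]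
      by_cases hx : x = c
      · simp [List.isPrefixOf, hx, ih _ _ ht]
        omega
      · simp [List.isPrefixOf, Ne.symm hx, hx, ih _ _ ht]

theorem count_single (s : List Char) (c : Char) :
    PySem.Chars.count s [c] = s.count c := by
  simp [PySem.Chars.count, countGo_single c s s.length 0 le_rfl]

theorem foldl_add_count (L : List Char) (s : List Char) (a : Nat) :
    L.foldl (fun acc c => acc + s.count c) a = a + (L.map (fun c => s.count c)).sum := by
  induction L generalizing a with
  | nil => simp
  | cons x t ih => simp [List.foldl_cons, ih, Nat.add_assoc]

theorem sum_ite_mem (L : List Char) (hL : L.Nodup) (x : Char) :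
    (L.map (fun c => if x = c then 1 else 0)).sum = (if x ∈ L then 1 else 0) := by
  induction L with
  | nil => simp
  | cons h t ih =>
    simp only [List.nodup_cons] at hL
    by_cases hx : x = h
    · subst hx
      simp [hL.1, ih hL.2]
    · simp [hx, ih hL.2]

theorem sum_counts (L : List Char) (hL : L.Nodup) (s : List Char) :
    (L.map (fun c => s.count c)).sum = s.countP (fun x => x ∈ L) := by
  induction s with
  | nil => simp
  | cons x t ih =>
    simp only [List.count_cons, List.countP_cons, List.sum_map_add, ih]
    congr 1
    simpa using sum_ite_mem L hL x

theorem frvLoop_eq_all (l : List Char) : frvLoop l = l.all (fun c => ffr.contains c) := by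
  induction l with
  | nil => rfl
  | cons c rest ih =>
    cases h : ffr.contains c
    all_goals
      simp at h
      simp [frvLoop, List.all_cons, ih, h]

theorem frvLoop_ofList (s : List Char) :
    frvLoop (PySem.Set.ofList s) = s.all (fun c => ffr.contains c) := by
  rw [frvLoop_eq_all]
  by_cases h : s.all (fun c => ffr.contains c) = true
  · rw [h, List.all_eq_true]
    intro c hc
    exact (List.all_eq_true.mp h) c ((PySem.Set.mem_ofList _ _).mp hc)
  · rw [Bool.not_eq_true] at h
    rw [h, List.all_eq_false]
    obtain ⟨c, hc, hnc⟩ := List.all_eq_false.mp h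
    exact ⟨c, (PySem.Set.mem_ofList _ _).mpr hc, hnc⟩

theorem ffr_nodup : ffr.Nodup := by decide

-- ===== VERDICT (by name: the statement is the Claim_ definition above) =====
theorem frv_spec : Claim_equal_frv := by
  intro Fg _
  unfold Spec_frv frv frv_alt
  by_cases h : PySem.Str.len Fg > 0
  · rw [if_pos h, decide_eq_true h, Bool.true_and, frvLoop_ofList]
    have hcnt : ∀ c, PySem.Str.count Fg (String.ofList [c]) = Fg.toList.count c := by
      intro c
      rw [PySem.Str.count_eq]
      simp [count_single]
    have hsum : ffr.foldl (fun acc c => acc + PySem.Str.count Fg (String.ofList [c])) 0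
        = Fg.toList.countP (fun x => x ∈ ffr) := by
      calc ffr.foldl (fun acc c => acc + PySem.Str.count Fg (String.ofList [c])) 0
          = ffr.foldl (fun acc c => acc + Fg.toList.count c) 0 := by
            simp only [hcnt]
        _ = 0 + (ffr.map (fun c => Fg.toList.count c)).sum := foldl_add_count ffr Fg.toList 0
        _ = Fg.toList.countP (fun x => x ∈ ffr) := by
            rw [Nat.zero_add]; exact sum_counts ffr ffr_nodup Fg.toList
    rw [hsum]
    by_cases hall : Fg.toList.all (fun c => ffr.contains c) = true
    · rw [hall]
      have : Fg.toList.countP (fun x => x ∈ ffr) = Fg.toList.length := by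
        rw [List.countP_eq_length]
        intro a ha
        simpa using (List.all_eq_true.mp hall) a ha
      simp [this]
    · rw [Bool.not_eq_true] at hall
      rw [hall]
      have hne : Fg.toList.countP (fun x => x ∈ ffr) ≠ Fg.length := by
        rw [← String.length_toList]
        intro hEq
        obtain ⟨c, hc, hnc⟩ := List.all_eq_false.mp hall
        have hmem := List.countP_eq_length.mp hEq c hc
        simp at hmem hnc
        exact hnc hmem
      simp [hne]
  · rw [if_neg h, decide_eq_false h, Bool.false_and]
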